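-- pv_equiv track=rewrite | github.com/akaliutau/timeseries-compressor | utils.py | array_est
-- ===== SOURCE A (Python) =====
-- from typing import List
--
-- def array_est(value: List[int]) -> int:
--     i = 0
--     while i < len(value):
--         if value[i] != 0:
--             break
--         i += 1
--     if i == len(value):
--         return 1
--     offset = i
--     i = len(value) - 1
--     while i > -1:
--         if value[i] != 0:
--             break
--         i -= 1
--     return 11 + (i - offset + 1) * 8  # bits 1|5bit|5bit|data
-- ===== SOURCE B (Python) =====
-- from typing import List
--
-- def array_est(value: List[int]) -> int:
--     first = None
--     last = 0
--     for idx, v in enumerate(value):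
--         if v != 0:
--             if first is None:
--                 first = idx
--             last = idx
--     if first is None:
--         return 1
--     return 11 + (last - first + 1) * 8  # bits 1|5bit|5bit|data
-- ===== Notes on version B (the rewrite author's own statement) =====
-- stated objective: simpler
-- what changed: Replaces A's two early-breaking index scans (forward for the first non-zero, backward for the last) with a single full forward pass that maintains running first/last non-zero markers.
import Mathlib
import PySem

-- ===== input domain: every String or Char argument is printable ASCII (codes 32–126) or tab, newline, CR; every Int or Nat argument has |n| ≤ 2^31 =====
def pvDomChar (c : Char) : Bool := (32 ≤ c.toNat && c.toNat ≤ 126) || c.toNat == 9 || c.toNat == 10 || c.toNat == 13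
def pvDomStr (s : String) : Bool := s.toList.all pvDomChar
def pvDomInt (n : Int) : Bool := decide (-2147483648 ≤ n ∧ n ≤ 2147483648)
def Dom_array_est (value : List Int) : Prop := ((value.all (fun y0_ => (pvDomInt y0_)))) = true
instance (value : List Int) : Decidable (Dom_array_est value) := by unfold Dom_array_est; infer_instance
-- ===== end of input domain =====

-- B replaces A's two early-breaking scans by one full pass keeping first/last non-zero markers (simpler).

-- ===== PORT A =====
-- first while loop: i counts up from 0 until value[i] != 0 or i = len(value)
def aScanFwd : List Int → Nat
  | [] => 0
  | x :: xs => if x ≠ 0 then 0 else aScanFwd xs + 1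

-- second while loop: i counts down from len(value)-1 until value[i] != 0 or i = -1
def aScanBwd (value : List Int) : Nat → Int
  | 0 => if value.getD 0 0 ≠ 0 then (0 : Int) else -1
  | j + 1 => if value.getD (j + 1) 0 ≠ 0 then ((j + 1 : Nat) : Int) else aScanBwd value j

def array_est (value : List Int) : Int :=
  let i := aScanFwd value
  if i = value.length then 1
  else
    let offset : Int := i
    11 + (aScanBwd value (value.length - 1) - offset + 1) * 8  -- bits 1|5bit|5bit|data

-- ===== PORT B =====
-- single for-loop over enumerate(value): state = (first : Option, last)
def bLoop : List Int → Int → Option Int × Int → Option Int × Int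
  | [], _, st => st
  | v :: vs, idx, st =>
      bLoop vs (idx + 1) (if v ≠ 0 then (some (st.1.getD idx), idx) else st)

def array_est_alt (value : List Int) : Int :=
  let st := bLoop value 0 (none, 0)
  match st.1 with
  | none => 1
  | some first => 11 + (st.2 - first + 1) * 8  -- bits 1|5bit|5bit|data

-- ===== PRECONDITION & SPEC =====
def Spec_array_est (value : List Int) (out : Int) : Prop := out = array_est_alt value
instance (value : List Int) (out : Int) : Decidable (Spec_array_est value out) := by unfold Spec_array_est; infer_instance

-- ===== CLAIM (what is proved, stated in full; the proofs are below) =====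
def Claim_equal_array_est : Prop := ∀ (value : List Int), Dom_array_est value → Spec_array_est value (array_est value)

-- ===== LEMMAS AND PROOFS =====

-- index of the first non-zero element (proof helper)
def fNZ : List Int → Option Nat
  | [] => none
  | x :: xs => if x ≠ 0 then some 0 else (fNZ xs).map (· + 1)

-- index of the last non-zero element (proof helper)
def lNZ : List Int → Option Nat
  | [] => none
  | x :: xs =>
      match lNZ xs with
      | some j => some (j + 1)
      | none => if x ≠ 0 then some 0 else none

theorem fNZ_none_iff {xs : List Int} : fNZ xs = none ↔ lNZ xs = none := by
  induction xs with
  | nil => simp [fNZ, lNZ]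
  | cons x xs ih =>
    by_cases hx : x = 0 <;>
      cases h : lNZ xs <;> cases h' : fNZ xs <;>
        simp_all [fNZ, lNZ]

theorem fNZ_lt {xs : List Int} {f : Nat} (h : fNZ xs = some f) : f < xs.length := by
  induction xs generalizing f with
  | nil => simp [fNZ] at h
  | cons x xs ih =>
    by_cases hx : x = 0
    · simp [fNZ, hx] at h
      obtain ⟨g, hg, rfl⟩ := h
      simpa using Nat.succ_lt_succ (ih hg)
    · simp [fNZ, hx] at h
      subst h; simp

theorem aScanFwd_char (xs : List Int) :
    aScanFwd xs = match fNZ xs with | none => xs.length | some f => f := by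
  induction xs with
  | nil => simp [aScanFwd, fNZ]
  | cons x xs ih =>
    by_cases hx : x = 0
    · cases h : fNZ xs <;> simp_all [aScanFwd, fNZ]
    · simp [aScanFwd, fNZ, hx]

theorem lNZ_append (ys : List Int) (x : Int) :
    lNZ (ys ++ [x]) = if x ≠ 0 then some ys.length else lNZ ys := by
  induction ys with
  | nil => by_cases hx : x = 0 <;> simp [lNZ, hx]
  | cons y ys ih =>
    by_cases hx : x = 0 <;>
      cases h : lNZ ys <;> simp_all [lNZ] <;> split <;> simp_all

theorem aScanBwd_char (xs : List Int) (i : Nat) (hi : i < xs.length) :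
    aScanBwd xs i = match lNZ (xs.take (i + 1)) with | none => -1 | some j => (j : Int) := by
  induction i with
  | zero =>
    have h0 : xs.take 1 = [xs.getD 0 0] := by
      cases xs with
      | nil => simp at hi
      | cons a as => simp [List.getD]
    rw [h0]
    by_cases h : xs.getD 0 0 = 0 <;>
      simp [aScanBwd, lNZ, List.getD, h] <;> simp [List.getD] at h <;> simp [h]
  | succ j ih =>
    have hj : j < xs.length := Nat.lt_of_succ_lt hi
    have hget : xs[j+1]? = some (xs[j+1]'hi) := List.getElem?_eq_getElem hi
    have htake : xs.take (j + 2) = xs.take (j + 1) ++ [xs.getD (j + 1) 0] := by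
      rw [List.take_add_one, hget]
      simp [List.getD, hget]
    rw [aScanBwd, htake, lNZ_append]
    have hlen : (xs.take (j + 1)).length = j + 1 :=
      List.length_take_of_le (Nat.le_of_lt hi)
    by_cases h : xs.getD (j + 1) 0 = 0
    · simp only [List.getD] at h
      simp only [List.getD, h, ne_eq, not_true_eq_false, ite_false, if_neg]
      simpa using ih hj
    · simp only [List.getD] at h
      simp [List.getD, h, hlen]

theorem bLoop_char (xs : List Int) (idx : Int) (st : Option Int × Int) :
    bLoop xs idx st =
      match fNZ xs, lNZ xs with
      | some f, some j => (some (st.1.getD (idx + f)), idx + j)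
      | _, _ => st := by
  induction xs generalizing idx st with
  | nil => simp [bLoop, fNZ, lNZ]
  | cons x xs ih =>
    by_cases hx : x = 0
    · rw [bLoop]
      simp only [hx, ne_eq, not_true_eq_false, if_neg, ite_false]
      rw [ih]
      cases hf : fNZ xs with
      | none =>
        have hl : lNZ xs = none := fNZ_none_iff.mp hf
        simp [fNZ, lNZ, hx, hf, hl]
      | some f =>
        cases hl : lNZ xs with
        | none =>
          exfalso
          have := fNZ_none_iff.mpr hl
          simp [hf] at this
        | some j =>
          simp only [fNZ, lNZ, hx, hf, hl, ne_eq, not_true_eq_false, ite_false,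
            Option.map_some]
          have h1 : idx + 1 + (f : Int) = idx + ((f : Nat) + 1 : Nat) := by push_cast; ring
          have h2 : idx + 1 + (j : Int) = idx + ((j : Nat) + 1 : Nat) := by push_cast; ring
          rw [h1, h2]
    · rw [bLoop]
      simp only [hx, ne_eq, not_false_eq_true, if_pos, ite_true]
      rw [ih]
      cases hf : fNZ xs with
      | none =>
        have hl : lNZ xs = none := fNZ_none_iff.mp hf
        simp [fNZ, lNZ, hx, hf, hl]
      | some f =>
        cases hl : lNZ xs with
        | none =>
          exfalso
          have := fNZ_none_iff.mpr hl
          simp [hf] at this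
        | some j =>
          simp only [fNZ, lNZ, hx, hf, hl]
          have h2 : idx + 1 + (j : Int) = idx + ((j : Nat) + 1 : Nat) := by push_cast; ring
          simp [hx, h2]

-- ===== VERDICT (by name: the statement is the Claim_ definition above) =====
theorem array_est_spec : Claim_equal_array_est := by
  intro value _
  unfold Spec_array_est array_est array_est_alt
  rw [bLoop_char, aScanFwd_char]
  cases hf : fNZ value with
  | none =>
    have hl : lNZ value = none := fNZ_none_iff.mp hf
    simp [hl]
  | some f =>
    cases hl : lNZ value with
    | none =>
      exfalso
      have := fNZ_none_iff.mpr hl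
      simp [hf] at this
    | some j =>
      have hflt : f < value.length := fNZ_lt hf
      have hne : f ≠ value.length := Nat.ne_of_lt hflt
      have hlen : value.length - 1 < value.length := by omega
      have htake : value.take (value.length - 1 + 1) = value := by
        have : value.length - 1 + 1 = value.length := by omega
        rw [this, List.take_length]
      rw [aScanBwd_char value _ hlen, htake]
      simp [hne, hl]
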